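-- pv_equiv track=rewrite | github.com/alexanderjlewis/AdventOfCode | 2021/19_stolen.py | rotations
-- ===== SOURCE A (Python) =====
-- from copy import deepcopy as dc
--
-- def rotations(s):
--     s = dc(s)
--     k = []
--     for _ in range(4):
--         for _ in range(4):
--             k.append(s)
--             s = {(z, y, -x) for x, y, z in s}
--         k.append({(y, -x, z) for x, y, z in s})
--         k.append({(-y, x, z) for x, y, z in s})
--         s = {(x, z, -y) for x, y, z in s}
--     return k
-- ===== SOURCE B (Python) =====
-- # B: a flat table of the 24 orientation transforms (signed coordinate permutations),
-- # each applied directly to the original point set, instead of A's incremental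
-- # rotate-and-carry-state double loop.
-- _TABLE = [
--     lambda x, y, z: (x, y, z),
--     lambda x, y, z: (z, y, -x),
--     lambda x, y, z: (-x, y, -z),
--     lambda x, y, z: (-z, y, x),
--     lambda x, y, z: (y, -x, z),
--     lambda x, y, z: (-y, x, z),
--     lambda x, y, z: (x, z, -y),
--     lambda x, y, z: (-y, z, -x),
--     lambda x, y, z: (-x, z, y),
--     lambda x, y, z: (y, z, x),
--     lambda x, y, z: (z, -x, -y),
--     lambda x, y, z: (-z, x, -y),
--     lambda x, y, z: (x, -y, -z),
--     lambda x, y, z: (-z, -y, -x),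
--     lambda x, y, z: (-x, -y, z),
--     lambda x, y, z: (z, -y, x),
--     lambda x, y, z: (-y, -x, -z),
--     lambda x, y, z: (y, x, -z),
--     lambda x, y, z: (x, -z, y),
--     lambda x, y, z: (y, -z, -x),
--     lambda x, y, z: (-x, -z, -y),
--     lambda x, y, z: (-y, -z, x),
--     lambda x, y, z: (-z, -x, y),
--     lambda x, y, z: (z, x, y),
-- ]
--
-- def rotations(s):
--     return [{t(x, y, z) for x, y, z in s} for t in _TABLE]
-- ===== Notes on version B (the rewrite author's own statement) =====
-- stated objective: idiomatic
-- what changed: B replaces A's stateful nested rotate-and-carry loops with an explicit table of the 24 signed-permutation transforms, each applied directly to the original point set.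
import Mathlib
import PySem

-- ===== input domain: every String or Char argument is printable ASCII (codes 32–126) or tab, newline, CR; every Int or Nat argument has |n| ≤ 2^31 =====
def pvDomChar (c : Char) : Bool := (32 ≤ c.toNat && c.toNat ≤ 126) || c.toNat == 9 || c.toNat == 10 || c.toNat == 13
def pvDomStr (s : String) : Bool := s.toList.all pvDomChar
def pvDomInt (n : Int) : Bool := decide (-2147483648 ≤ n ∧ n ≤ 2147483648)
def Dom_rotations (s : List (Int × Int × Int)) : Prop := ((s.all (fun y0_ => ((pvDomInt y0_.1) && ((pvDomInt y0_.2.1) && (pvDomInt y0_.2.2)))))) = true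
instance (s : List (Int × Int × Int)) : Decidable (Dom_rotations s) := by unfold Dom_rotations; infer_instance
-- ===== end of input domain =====

-- B replaces A's stateful rotate-and-carry nested loops by a flat table of the 24 signed
-- coordinate permutations, each applied directly to the original set; same cost, more direct.

-- ===== PORT A =====
-- the four set comprehensions of A, as point transforms
def rotA_rY (p : Int × Int × Int) : Int × Int × Int := (p.2.2, p.2.1, -p.1)
def rotA_rZ (p : Int × Int × Int) : Int × Int × Int := (p.2.1, -p.1, p.2.2)
def rotA_rZp (p : Int × Int × Int) : Int × Int × Int := (-p.2.1, p.1, p.2.2)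
def rotA_rX (p : Int × Int × Int) : Int × Int × Int := (p.1, p.2.2, -p.2.1)

def rotations (s : List (Int × Int × Int)) : List (List (Int × Int × Int)) :=
  ((List.range 4).foldl (fun st _ =>
      let st2 := (List.range 4).foldl
        (fun st _ => (st.1 ++ [st.2], PySem.Set.ofList (st.2.map rotA_rY))) st
      (st2.1 ++ [PySem.Set.ofList (st2.2.map rotA_rZ), PySem.Set.ofList (st2.2.map rotA_rZp)],
       PySem.Set.ofList (st2.2.map rotA_rX)))
    (([] : List (List (Int × Int × Int))), s)).1

-- ===== PORT B =====
def rotB_table : List ((Int × Int × Int) → (Int × Int × Int)) := [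
  fun p => (p.1, p.2.1, p.2.2),
  fun p => (p.2.2, p.2.1, -p.1),
  fun p => (-p.1, p.2.1, -p.2.2),
  fun p => (-p.2.2, p.2.1, p.1),
  fun p => (p.2.1, -p.1, p.2.2),
  fun p => (-p.2.1, p.1, p.2.2),
  fun p => (p.1, p.2.2, -p.2.1),
  fun p => (-p.2.1, p.2.2, -p.1),
  fun p => (-p.1, p.2.2, p.2.1),
  fun p => (p.2.1, p.2.2, p.1),
  fun p => (p.2.2, -p.1, -p.2.1),
  fun p => (-p.2.2, p.1, -p.2.1),
  fun p => (p.1, -p.2.1, -p.2.2),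
  fun p => (-p.2.2, -p.2.1, -p.1),
  fun p => (-p.1, -p.2.1, p.2.2),
  fun p => (p.2.2, -p.2.1, p.1),
  fun p => (-p.2.1, -p.1, -p.2.2),
  fun p => (p.2.1, p.1, -p.2.2),
  fun p => (p.1, -p.2.2, p.2.1),
  fun p => (p.2.1, -p.2.2, -p.1),
  fun p => (-p.1, -p.2.2, -p.2.1),
  fun p => (-p.2.1, -p.2.2, p.1),
  fun p => (-p.2.2, -p.1, p.2.1),
  fun p => (p.2.2, p.1, p.2.1)]

def rotations_alt (s : List (Int × Int × Int)) : List (List (Int × Int × Int)) :=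
  rotB_table.map (fun t => PySem.Set.ofList (s.map t))

-- ===== PRECONDITION & SPEC =====
-- Pre_ only states the type-convention invariant: the argument encodes a Python set, so its
-- list representation holds distinct elements; it excludes no Python input A accepts.
def Pre_rotations (s : List (Int × Int × Int)) : Prop := s.Nodup
instance (s : List (Int × Int × Int)) : Decidable (Pre_rotations s) := by unfold Pre_rotations; infer_instance

def pvWitness_rotations : (List (Int × Int × Int)) := [(1, 2, 3), (-4, 0, 5)]

def Spec_rotations (s : List (Int × Int × Int)) (out : List (List (Int × Int × Int))) : Prop := out = rotations_alt s
instance (s : List (Int × Int × Int)) (out : List (List (Int × Int × Int))) : Decidable (Spec_rotations s out) := by unfold Spec_rotations; infer_instance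

-- ===== CLAIM (what is proved, stated in full; the proofs are below) =====
def Claim_equal_rotations : Prop := ∀ (s : List (Int × Int × Int)), Dom_rotations s → Pre_rotations s → Spec_rotations s (rotations s)

-- ===== LEMMAS AND PROOFS =====

theorem rot_ofList_map_inj {f : Int × Int × Int → Int × Int × Int}
    (hf : Function.Injective f) {l : List (Int × Int × Int)} (h : l.Nodup) :
    PySem.Set.ofList (l.map f) = l.map f :=
  PySem.Set.ofList_eq_self_of_nodup _ (h.map hf)

theorem rotA_rY_inj : Function.Injective rotA_rY := by
  intro ⟨a, b, c⟩ ⟨d, e, g⟩ h; simp only [rotA_rY, Prod.mk.injEq] at h ⊢; omega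
theorem rotA_rZ_inj : Function.Injective rotA_rZ := by
  intro ⟨a, b, c⟩ ⟨d, e, g⟩ h; simp only [rotA_rZ, Prod.mk.injEq] at h ⊢; omega
theorem rotA_rZp_inj : Function.Injective rotA_rZp := by
  intro ⟨a, b, c⟩ ⟨d, e, g⟩ h; simp only [rotA_rZp, Prod.mk.injEq] at h ⊢; omega
theorem rotA_rX_inj : Function.Injective rotA_rX := by
  intro ⟨a, b, c⟩ ⟨d, e, g⟩ h; simp only [rotA_rX, Prod.mk.injEq] at h ⊢; omega

-- conditional rewrites removing Set.ofList around an injective map over a nodup list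
theorem rot_of_rY {l : List (Int × Int × Int)} (h : l.Nodup) :
    PySem.Set.ofList (l.map rotA_rY) = l.map rotA_rY := rot_ofList_map_inj rotA_rY_inj h
theorem rot_of_rZ {l : List (Int × Int × Int)} (h : l.Nodup) :
    PySem.Set.ofList (l.map rotA_rZ) = l.map rotA_rZ := rot_ofList_map_inj rotA_rZ_inj h
theorem rot_of_rZp {l : List (Int × Int × Int)} (h : l.Nodup) :
    PySem.Set.ofList (l.map rotA_rZp) = l.map rotA_rZp := rot_ofList_map_inj rotA_rZp_inj h
theorem rot_of_rX {l : List (Int × Int × Int)} (h : l.Nodup) :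
    PySem.Set.ofList (l.map rotA_rX) = l.map rotA_rX := rot_ofList_map_inj rotA_rX_inj h
theorem rot_nod_rY {l : List (Int × Int × Int)} (h : l.Nodup) : (l.map rotA_rY).Nodup := h.map rotA_rY_inj
theorem rot_nod_rX {l : List (Int × Int × Int)} (h : l.Nodup) : (l.map rotA_rX).Nodup := h.map rotA_rX_inj

-- the same removal for each of B's 24 table entries
theorem rotB_inj_0 : Function.Injective (fun p : Int × Int × Int => (p.1, p.2.1, p.2.2)) := by
  intro ⟨a, b, c⟩ ⟨d, e, g⟩ h; simp only [Prod.mk.injEq] at h ⊢; omega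
theorem rotB_of_0 {l : List (Int × Int × Int)} (h : l.Nodup) :
    PySem.Set.ofList (l.map (fun p : Int × Int × Int => (p.1, p.2.1, p.2.2))) = l.map (fun p : Int × Int × Int => (p.1, p.2.1, p.2.2)) :=
  rot_ofList_map_inj rotB_inj_0 h
theorem rotB_inj_1 : Function.Injective (fun p : Int × Int × Int => (p.2.2, p.2.1, -p.1)) := by
  intro ⟨a, b, c⟩ ⟨d, e, g⟩ h; simp only [Prod.mk.injEq] at h ⊢; omega
theorem rotB_of_1 {l : List (Int × Int × Int)} (h : l.Nodup) :
    PySem.Set.ofList (l.map (fun p : Int × Int × Int => (p.2.2, p.2.1, -p.1))) = l.map (fun p : Int × Int × Int => (p.2.2, p.2.1, -p.1)) :=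
  rot_ofList_map_inj rotB_inj_1 h
theorem rotB_inj_2 : Function.Injective (fun p : Int × Int × Int => (-p.1, p.2.1, -p.2.2)) := by
  intro ⟨a, b, c⟩ ⟨d, e, g⟩ h; simp only [Prod.mk.injEq] at h ⊢; omega
theorem rotB_of_2 {l : List (Int × Int × Int)} (h : l.Nodup) :
    PySem.Set.ofList (l.map (fun p : Int × Int × Int => (-p.1, p.2.1, -p.2.2))) = l.map (fun p : Int × Int × Int => (-p.1, p.2.1, -p.2.2)) :=
  rot_ofList_map_inj rotB_inj_2 h
theorem rotB_inj_3 : Function.Injective (fun p : Int × Int × Int => (-p.2.2, p.2.1, p.1)) := by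
  intro ⟨a, b, c⟩ ⟨d, e, g⟩ h; simp only [Prod.mk.injEq] at h ⊢; omega
theorem rotB_of_3 {l : List (Int × Int × Int)} (h : l.Nodup) :
    PySem.Set.ofList (l.map (fun p : Int × Int × Int => (-p.2.2, p.2.1, p.1))) = l.map (fun p : Int × Int × Int => (-p.2.2, p.2.1, p.1)) :=
  rot_ofList_map_inj rotB_inj_3 h
theorem rotB_inj_4 : Function.Injective (fun p : Int × Int × Int => (p.2.1, -p.1, p.2.2)) := by
  intro ⟨a, b, c⟩ ⟨d, e, g⟩ h; simp only [Prod.mk.injEq] at h ⊢; omega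
theorem rotB_of_4 {l : List (Int × Int × Int)} (h : l.Nodup) :
    PySem.Set.ofList (l.map (fun p : Int × Int × Int => (p.2.1, -p.1, p.2.2))) = l.map (fun p : Int × Int × Int => (p.2.1, -p.1, p.2.2)) :=
  rot_ofList_map_inj rotB_inj_4 h
theorem rotB_inj_5 : Function.Injective (fun p : Int × Int × Int => (-p.2.1, p.1, p.2.2)) := by
  intro ⟨a, b, c⟩ ⟨d, e, g⟩ h; simp only [Prod.mk.injEq] at h ⊢; omega
theorem rotB_of_5 {l : List (Int × Int × Int)} (h : l.Nodup) :
    PySem.Set.ofList (l.map (fun p : Int × Int × Int => (-p.2.1, p.1, p.2.2))) = l.map (fun p : Int × Int × Int => (-p.2.1, p.1, p.2.2)) :=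
  rot_ofList_map_inj rotB_inj_5 h
theorem rotB_inj_6 : Function.Injective (fun p : Int × Int × Int => (p.1, p.2.2, -p.2.1)) := by
  intro ⟨a, b, c⟩ ⟨d, e, g⟩ h; simp only [Prod.mk.injEq] at h ⊢; omega
theorem rotB_of_6 {l : List (Int × Int × Int)} (h : l.Nodup) :
    PySem.Set.ofList (l.map (fun p : Int × Int × Int => (p.1, p.2.2, -p.2.1))) = l.map (fun p : Int × Int × Int => (p.1, p.2.2, -p.2.1)) :=
  rot_ofList_map_inj rotB_inj_6 h
theorem rotB_inj_7 : Function.Injective (fun p : Int × Int × Int => (-p.2.1, p.2.2, -p.1)) := by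
  intro ⟨a, b, c⟩ ⟨d, e, g⟩ h; simp only [Prod.mk.injEq] at h ⊢; omega
theorem rotB_of_7 {l : List (Int × Int × Int)} (h : l.Nodup) :
    PySem.Set.ofList (l.map (fun p : Int × Int × Int => (-p.2.1, p.2.2, -p.1))) = l.map (fun p : Int × Int × Int => (-p.2.1, p.2.2, -p.1)) :=
  rot_ofList_map_inj rotB_inj_7 h
theorem rotB_inj_8 : Function.Injective (fun p : Int × Int × Int => (-p.1, p.2.2, p.2.1)) := by
  intro ⟨a, b, c⟩ ⟨d, e, g⟩ h; simp only [Prod.mk.injEq] at h ⊢; omega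
theorem rotB_of_8 {l : List (Int × Int × Int)} (h : l.Nodup) :
    PySem.Set.ofList (l.map (fun p : Int × Int × Int => (-p.1, p.2.2, p.2.1))) = l.map (fun p : Int × Int × Int => (-p.1, p.2.2, p.2.1)) :=
  rot_ofList_map_inj rotB_inj_8 h
theorem rotB_inj_9 : Function.Injective (fun p : Int × Int × Int => (p.2.1, p.2.2, p.1)) := by
  intro ⟨a, b, c⟩ ⟨d, e, g⟩ h; simp only [Prod.mk.injEq] at h ⊢; omega
theorem rotB_of_9 {l : List (Int × Int × Int)} (h : l.Nodup) :
    PySem.Set.ofList (l.map (fun p : Int × Int × Int => (p.2.1, p.2.2, p.1))) = l.map (fun p : Int × Int × Int => (p.2.1, p.2.2, p.1)) :=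
  rot_ofList_map_inj rotB_inj_9 h
theorem rotB_inj_10 : Function.Injective (fun p : Int × Int × Int => (p.2.2, -p.1, -p.2.1)) := by
  intro ⟨a, b, c⟩ ⟨d, e, g⟩ h; simp only [Prod.mk.injEq] at h ⊢; omega
theorem rotB_of_10 {l : List (Int × Int × Int)} (h : l.Nodup) :
    PySem.Set.ofList (l.map (fun p : Int × Int × Int => (p.2.2, -p.1, -p.2.1))) = l.map (fun p : Int × Int × Int => (p.2.2, -p.1, -p.2.1)) :=
  rot_ofList_map_inj rotB_inj_10 h
theorem rotB_inj_11 : Function.Injective (fun p : Int × Int × Int => (-p.2.2, p.1, -p.2.1)) := by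
  intro ⟨a, b, c⟩ ⟨d, e, g⟩ h; simp only [Prod.mk.injEq] at h ⊢; omega
theorem rotB_of_11 {l : List (Int × Int × Int)} (h : l.Nodup) :
    PySem.Set.ofList (l.map (fun p : Int × Int × Int => (-p.2.2, p.1, -p.2.1))) = l.map (fun p : Int × Int × Int => (-p.2.2, p.1, -p.2.1)) :=
  rot_ofList_map_inj rotB_inj_11 h
theorem rotB_inj_12 : Function.Injective (fun p : Int × Int × Int => (p.1, -p.2.1, -p.2.2)) := by
  intro ⟨a, b, c⟩ ⟨d, e, g⟩ h; simp only [Prod.mk.injEq] at h ⊢; omega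
theorem rotB_of_12 {l : List (Int × Int × Int)} (h : l.Nodup) :
    PySem.Set.ofList (l.map (fun p : Int × Int × Int => (p.1, -p.2.1, -p.2.2))) = l.map (fun p : Int × Int × Int => (p.1, -p.2.1, -p.2.2)) :=
  rot_ofList_map_inj rotB_inj_12 h
theorem rotB_inj_13 : Function.Injective (fun p : Int × Int × Int => (-p.2.2, -p.2.1, -p.1)) := by
  intro ⟨a, b, c⟩ ⟨d, e, g⟩ h; simp only [Prod.mk.injEq] at h ⊢; omega
theorem rotB_of_13 {l : List (Int × Int × Int)} (h : l.Nodup) :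
    PySem.Set.ofList (l.map (fun p : Int × Int × Int => (-p.2.2, -p.2.1, -p.1))) = l.map (fun p : Int × Int × Int => (-p.2.2, -p.2.1, -p.1)) :=
  rot_ofList_map_inj rotB_inj_13 h
theorem rotB_inj_14 : Function.Injective (fun p : Int × Int × Int => (-p.1, -p.2.1, p.2.2)) := by
  intro ⟨a, b, c⟩ ⟨d, e, g⟩ h; simp only [Prod.mk.injEq] at h ⊢; omega
theorem rotB_of_14 {l : List (Int × Int × Int)} (h : l.Nodup) :
    PySem.Set.ofList (l.map (fun p : Int × Int × Int => (-p.1, -p.2.1, p.2.2))) = l.map (fun p : Int × Int × Int => (-p.1, -p.2.1, p.2.2)) :=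
  rot_ofList_map_inj rotB_inj_14 h
theorem rotB_inj_15 : Function.Injective (fun p : Int × Int × Int => (p.2.2, -p.2.1, p.1)) := by
  intro ⟨a, b, c⟩ ⟨d, e, g⟩ h; simp only [Prod.mk.injEq] at h ⊢; omega
theorem rotB_of_15 {l : List (Int × Int × Int)} (h : l.Nodup) :
    PySem.Set.ofList (l.map (fun p : Int × Int × Int => (p.2.2, -p.2.1, p.1))) = l.map (fun p : Int × Int × Int => (p.2.2, -p.2.1, p.1)) :=
  rot_ofList_map_inj rotB_inj_15 h
theorem rotB_inj_16 : Function.Injective (fun p : Int × Int × Int => (-p.2.1, -p.1, -p.2.2)) := by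
  intro ⟨a, b, c⟩ ⟨d, e, g⟩ h; simp only [Prod.mk.injEq] at h ⊢; omega
theorem rotB_of_16 {l : List (Int × Int × Int)} (h : l.Nodup) :
    PySem.Set.ofList (l.map (fun p : Int × Int × Int => (-p.2.1, -p.1, -p.2.2))) = l.map (fun p : Int × Int × Int => (-p.2.1, -p.1, -p.2.2)) :=
  rot_ofList_map_inj rotB_inj_16 h
theorem rotB_inj_17 : Function.Injective (fun p : Int × Int × Int => (p.2.1, p.1, -p.2.2)) := by
  intro ⟨a, b, c⟩ ⟨d, e, g⟩ h; simp only [Prod.mk.injEq] at h ⊢; omega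
theorem rotB_of_17 {l : List (Int × Int × Int)} (h : l.Nodup) :
    PySem.Set.ofList (l.map (fun p : Int × Int × Int => (p.2.1, p.1, -p.2.2))) = l.map (fun p : Int × Int × Int => (p.2.1, p.1, -p.2.2)) :=
  rot_ofList_map_inj rotB_inj_17 h
theorem rotB_inj_18 : Function.Injective (fun p : Int × Int × Int => (p.1, -p.2.2, p.2.1)) := by
  intro ⟨a, b, c⟩ ⟨d, e, g⟩ h; simp only [Prod.mk.injEq] at h ⊢; omega
theorem rotB_of_18 {l : List (Int × Int × Int)} (h : l.Nodup) :
    PySem.Set.ofList (l.map (fun p : Int × Int × Int => (p.1, -p.2.2, p.2.1))) = l.map (fun p : Int × Int × Int => (p.1, -p.2.2, p.2.1)) :=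
  rot_ofList_map_inj rotB_inj_18 h
theorem rotB_inj_19 : Function.Injective (fun p : Int × Int × Int => (p.2.1, -p.2.2, -p.1)) := by
  intro ⟨a, b, c⟩ ⟨d, e, g⟩ h; simp only [Prod.mk.injEq] at h ⊢; omega
theorem rotB_of_19 {l : List (Int × Int × Int)} (h : l.Nodup) :
    PySem.Set.ofList (l.map (fun p : Int × Int × Int => (p.2.1, -p.2.2, -p.1))) = l.map (fun p : Int × Int × Int => (p.2.1, -p.2.2, -p.1)) :=
  rot_ofList_map_inj rotB_inj_19 h
theorem rotB_inj_20 : Function.Injective (fun p : Int × Int × Int => (-p.1, -p.2.2, -p.2.1)) := by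
  intro ⟨a, b, c⟩ ⟨d, e, g⟩ h; simp only [Prod.mk.injEq] at h ⊢; omega
theorem rotB_of_20 {l : List (Int × Int × Int)} (h : l.Nodup) :
    PySem.Set.ofList (l.map (fun p : Int × Int × Int => (-p.1, -p.2.2, -p.2.1))) = l.map (fun p : Int × Int × Int => (-p.1, -p.2.2, -p.2.1)) :=
  rot_ofList_map_inj rotB_inj_20 h
theorem rotB_inj_21 : Function.Injective (fun p : Int × Int × Int => (-p.2.1, -p.2.2, p.1)) := by
  intro ⟨a, b, c⟩ ⟨d, e, g⟩ h; simp only [Prod.mk.injEq] at h ⊢; omega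
theorem rotB_of_21 {l : List (Int × Int × Int)} (h : l.Nodup) :
    PySem.Set.ofList (l.map (fun p : Int × Int × Int => (-p.2.1, -p.2.2, p.1))) = l.map (fun p : Int × Int × Int => (-p.2.1, -p.2.2, p.1)) :=
  rot_ofList_map_inj rotB_inj_21 h
theorem rotB_inj_22 : Function.Injective (fun p : Int × Int × Int => (-p.2.2, -p.1, p.2.1)) := by
  intro ⟨a, b, c⟩ ⟨d, e, g⟩ h; simp only [Prod.mk.injEq] at h ⊢; omega
theorem rotB_of_22 {l : List (Int × Int × Int)} (h : l.Nodup) :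
    PySem.Set.ofList (l.map (fun p : Int × Int × Int => (-p.2.2, -p.1, p.2.1))) = l.map (fun p : Int × Int × Int => (-p.2.2, -p.1, p.2.1)) :=
  rot_ofList_map_inj rotB_inj_22 h
theorem rotB_inj_23 : Function.Injective (fun p : Int × Int × Int => (p.2.2, p.1, p.2.1)) := by
  intro ⟨a, b, c⟩ ⟨d, e, g⟩ h; simp only [Prod.mk.injEq] at h ⊢; omega
theorem rotB_of_23 {l : List (Int × Int × Int)} (h : l.Nodup) :
    PySem.Set.ofList (l.map (fun p : Int × Int × Int => (p.2.2, p.1, p.2.1))) = l.map (fun p : Int × Int × Int => (p.2.2, p.1, p.2.1)) :=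
  rot_ofList_map_inj rotB_inj_23 h

-- ===== VERDICT (by name: the statement is the Claim_ definition above) =====
theorem rotations_spec : Claim_equal_rotations := by
  intro s _ hnd
  have hnd' : s.Nodup := hnd
  show rotations s = rotations_alt s
  have hr4 : List.range 4 = [0, 1, 2, 3] := by decide
  simp only [rotations, rotations_alt, rotB_table, hr4, List.foldl, List.map]
  -- strip Set.ofList from A's rotation chain, innermost first
  have n0 : s.Nodup := hnd'
  rw [rot_of_rY n0]
  have n1 := rot_nod_rY n0
  rw [rot_of_rY n1]
  have n2 := rot_nod_rY n1
  rw [rot_of_rY n2]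
  have n3 := rot_nod_rY n2
  rw [rot_of_rY n3]
  have n4 := rot_nod_rY n3
  rw [rot_of_rZ n4, rot_of_rZp n4]
  rw [rot_of_rX n4]
  have n5 := rot_nod_rX n4
  rw [rot_of_rY n5]
  have n6 := rot_nod_rY n5
  rw [rot_of_rY n6]
  have n7 := rot_nod_rY n6
  rw [rot_of_rY n7]
  have n8 := rot_nod_rY n7
  rw [rot_of_rY n8]
  have n9 := rot_nod_rY n8
  rw [rot_of_rZ n9, rot_of_rZp n9]
  rw [rot_of_rX n9]
  have n10 := rot_nod_rX n9
  rw [rot_of_rY n10]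
  have n11 := rot_nod_rY n10
  rw [rot_of_rY n11]
  have n12 := rot_nod_rY n11
  rw [rot_of_rY n12]
  have n13 := rot_nod_rY n12
  rw [rot_of_rY n13]
  have n14 := rot_nod_rY n13
  rw [rot_of_rZ n14, rot_of_rZp n14]
  rw [rot_of_rX n14]
  have n15 := rot_nod_rX n14
  rw [rot_of_rY n15]
  have n16 := rot_nod_rY n15
  rw [rot_of_rY n16]
  have n17 := rot_nod_rY n16
  rw [rot_of_rY n17]
  have n18 := rot_nod_rY n17
  rw [rot_of_rY n18]
  have n19 := rot_nod_rY n18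
  rw [rot_of_rZ n19, rot_of_rZp n19]
  -- strip Set.ofList from B's table entries
  rw [rotB_of_0 hnd', rotB_of_1 hnd', rotB_of_2 hnd', rotB_of_3 hnd', rotB_of_4 hnd', rotB_of_5 hnd', rotB_of_6 hnd', rotB_of_7 hnd', rotB_of_8 hnd', rotB_of_9 hnd', rotB_of_10 hnd', rotB_of_11 hnd', rotB_of_12 hnd', rotB_of_13 hnd', rotB_of_14 hnd', rotB_of_15 hnd', rotB_of_16 hnd', rotB_of_17 hnd', rotB_of_18 hnd', rotB_of_19 hnd', rotB_of_20 hnd', rotB_of_21 hnd', rotB_of_22 hnd', rotB_of_23 hnd']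
  -- both sides are now plain maps over s; compare the composed transforms pointwise
  simp [rotA_rY, rotA_rZ, rotA_rZp, rotA_rX, List.map_map, Function.comp_def, Prod.mk.eta]
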